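-- pv_equiv track=rewrite | github.com/jebaponselvasingh/codeprobe | backend/agents/agent_10_accessibility.py | _compute_wcag_summary
-- ===== SOURCE A (Python) =====
-- from typing import Any, Dict, List
--
-- def _compute_wcag_summary(violations: List[Dict]) -> Dict[str, str]:
--     a_rules = {"img-alt", "button-name", "link-name", "label", "html-has-lang"}
--     aa_rules = {"heading-order", "color-contrast", "interactive-element-affordance"}
--
--     a_violations = [v for v in violations if v.get("rule") in a_rules]
--     aa_violations = [v for v in violations if v.get("rule") in aa_rules]
--
--     return {
--         "A": "fail" if a_violations else "pass",
--         "AA": "fail" if aa_violations else "pass",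
--     }
-- ===== SOURCE B (Python) =====
-- def _compute_wcag_summary(violations):
--     A_RULES = {"img-alt", "button-name", "link-name", "label", "html-has-lang"}
--     AA_RULES = {"heading-order", "color-contrast", "interactive-element-affordance"}
--     a_fail = False
--     aa_fail = False
--     for v in violations:
--         r = v.get("rule")
--         if r in A_RULES:
--             a_fail = True
--         elif r in AA_RULES:
--             aa_fail = True
--         if a_fail and aa_fail:
--             break
--     return {"A": "fail" if a_fail else "pass", "AA": "fail" if aa_fail else "pass"}
-- ===== Notes on version B (the rewrite author's own statement) =====
-- stated objective: simpler
-- what changed: Replaces the two list-comprehension passes that materialize filtered violation lists with a single pass maintaining two boolean flags, fetching v.get('rule') once per item and breaking early once both levels have failed.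
import Mathlib
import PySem

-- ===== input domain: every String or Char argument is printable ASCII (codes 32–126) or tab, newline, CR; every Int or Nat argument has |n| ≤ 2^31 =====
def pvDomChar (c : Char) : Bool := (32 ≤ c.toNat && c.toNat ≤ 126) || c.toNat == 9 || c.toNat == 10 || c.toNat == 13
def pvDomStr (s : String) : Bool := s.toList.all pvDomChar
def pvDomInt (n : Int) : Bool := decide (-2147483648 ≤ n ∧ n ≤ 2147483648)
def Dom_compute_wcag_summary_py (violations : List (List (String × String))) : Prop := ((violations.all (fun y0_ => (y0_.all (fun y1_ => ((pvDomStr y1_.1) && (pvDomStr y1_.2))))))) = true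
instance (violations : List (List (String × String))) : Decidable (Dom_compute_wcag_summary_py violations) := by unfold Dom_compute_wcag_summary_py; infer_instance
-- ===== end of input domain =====

-- B replaces A's two list-comprehension passes (which materialize two filtered lists) with a
-- single boolean-flag pass that fetches the rule once per violation and breaks early (simpler).

-- ===== PORT A =====
-- the two rule sets (Python set literals of distinct strings)
def pvARules : List String := ["img-alt", "button-name", "link-name", "label", "html-has-lang"]
def pvAARules : List String := ["heading-order", "color-contrast", "interactive-element-affordance"]

-- `v.get("rule") in rules`: None (missing key) is never in the set
def pvRuleIn (v : List (String × String)) (rules : List String) : Bool :=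
  match (PySem.Dict.mk v).get? "rule" with
  | some r => rules.contains r
  | none => false

def compute_wcag_summary_py (violations : List (List (String × String))) : List (String × String) :=
  let a_violations := violations.filter (fun v => pvRuleIn v pvARules)
  let aa_violations := violations.filter (fun v => pvRuleIn v pvAARules)
  [("A", if a_violations.isEmpty then "pass" else "fail"),
   ("AA", if aa_violations.isEmpty then "pass" else "fail")]

-- ===== PORT B =====
-- the for-loop of Source B: two flags, elif, early break once both levels failed
def pvLoopB : List (List (String × String)) → Bool → Bool → Bool × Bool
  | [], a_fail, aa_fail => (a_fail, aa_fail)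
  | v :: rest, a_fail, aa_fail =>
    let r := (PySem.Dict.mk v).get? "rule"
    let p : Bool × Bool :=
      if (match r with | some x => pvARules.contains x | none => false) then (true, aa_fail)
      else if (match r with | some x => pvAARules.contains x | none => false) then (a_fail, true)
      else (a_fail, aa_fail)
    if p.1 && p.2 then p else pvLoopB rest p.1 p.2

def compute_wcag_summary_py_alt (violations : List (List (String × String))) : List (String × String) :=
  let p := pvLoopB violations false false
  [("A", if p.1 then "fail" else "pass"), ("AA", if p.2 then "fail" else "pass")]

-- ===== PRECONDITION & SPEC =====
def Spec_compute_wcag_summary_py (violations : List (List (String × String))) (out : List (String × String)) : Prop := out = compute_wcag_summary_py_alt violations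
instance (violations : List (List (String × String))) (out : List (String × String)) : Decidable (Spec_compute_wcag_summary_py violations out) := by unfold Spec_compute_wcag_summary_py; infer_instance

-- ===== CLAIM (what is proved, stated in full; the proofs are below) =====
def Claim_equal_compute_wcag_summary_py : Prop := ∀ (violations : List (List (String × String))), Dom_compute_wcag_summary_py violations → Spec_compute_wcag_summary_py violations (compute_wcag_summary_py violations)

-- ===== LEMMAS AND PROOFS =====

-- B's inline membership test is exactly pvRuleIn
theorem pvRuleIn_eq (v : List (String × String)) (rules : List String) :
    (match (PySem.Dict.mk v).get? "rule" with
     | some x => rules.contains x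
     | none => false) = pvRuleIn v rules := rfl

-- the A-level and AA-level rule sets are disjoint (so Source B's elif never hides an AA match)
theorem pvRuleIn_disj (v : List (String × String)) (h : pvRuleIn v pvARules = true) :
    pvRuleIn v pvAARules = false := by
  unfold pvRuleIn at *
  cases hg : (PySem.Dict.mk v).get? "rule" with
  | none => simp [hg] at h
  | some r =>
    simp only [hg, pvARules, pvAARules, List.contains_eq_mem] at *
    simp at h
    rcases h with h | h | h | h | h <;> simp [h]

-- the flag loop computes exactly "old flag OR some later violation matches", for both levels
theorem pvLoopB_spec (vs : List (List (String × String))) (a aa : Bool) :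
    pvLoopB vs a aa = (a || vs.any (fun v => pvRuleIn v pvARules),
                       aa || vs.any (fun v => pvRuleIn v pvAARules)) := by
  induction vs generalizing a aa with
  | nil => simp [pvLoopB]
  | cons v rest ih =>
    simp only [pvLoopB, List.any_cons, pvRuleIn_eq]
    split_ifs with h1 h2 <;> cases a <;> cases aa <;> simp_all [ih] <;>
      exact fun hc => absurd hc (by simp [pvRuleIn_disj v h1])

theorem filter_isEmpty_eq_not_any (p : List (String × String) → Bool)
    (vs : List (List (String × String))) : (vs.filter p).isEmpty = !(vs.any p) := by
  induction vs with
  | nil => simp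
  | cons v rest ih =>
    by_cases h : p v <;> simp [h, ih]

-- ===== VERDICT (by name: the statement is the Claim_ definition above) =====
theorem compute_wcag_summary_py_spec : Claim_equal_compute_wcag_summary_py := by
  intro violations _
  unfold Spec_compute_wcag_summary_py compute_wcag_summary_py compute_wcag_summary_py_alt
  rw [pvLoopB_spec]
  cases h1 : violations.any (fun v => pvRuleIn v pvARules) <;>
    cases h2 : violations.any (fun v => pvRuleIn v pvAARules) <;>
      simp [filter_isEmpty_eq_not_any, h1, h2]
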